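-- pv_equiv track=rewrite | github.com/EMilla6535/F1Data | app/utils/driver_utils.py | fixLapStartEnd
-- ===== SOURCE A (Python) =====
-- def fixLapStartEnd(laps_data):
--     # Fix: Case when the first lap_start|lap_end pair is a single None lap.
--     # if laps_data[0]['is_pit_out_lap'] == True and laps_data[1]['is_pit_out_lap'] == True:
--     #     laps_data = laps_data[1:]
--     if laps_data[0]['is_pit_out_lap'] == True and laps_data[1]['is_pit_out_lap'] == True:
--         laps_data = laps_data[1:]
--     fixed_laps = {'lap_start': [], 'lap_end': []}
--     for lap_n in range(len(laps_data)):
--         if laps_data[lap_n]['is_pit_out_lap'] or lap_n == 0: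
--             fixed_laps['lap_start'].append(lap_n)
--             if lap_n != 0:
--                 fixed_laps['lap_end'].append(lap_n)
--     fixed_laps['lap_end'].append(len(laps_data) + 1)
--     return fixed_laps
-- ===== SOURCE B (Python) =====
-- def fixLapStartEnd(laps_data):
--     # same top guard as the original (same slice, same exception behaviour)
--     if laps_data[0]['is_pit_out_lap'] == True and laps_data[1]['is_pit_out_lap'] == True:
--         laps_data = laps_data[1:]
--
--     # Recursive back-to-front construction: both boundary lists are built together
--     # by consing onto the results for the tail; no intermediate index list.
--     def go(laps, i):
--         if not laps:
--             return [], [i + 1]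
--         starts, ends = go(laps[1:], i + 1)
--         if i == 0:
--             return [0] + starts, ends
--         if laps[0]['is_pit_out_lap']:
--             return [i] + starts, [i] + ends
--         return starts, ends
--
--     s, e = go(laps_data, 0)
--     return {'lap_start': s, 'lap_end': e}
-- ===== Notes on version B (the rewrite author's own statement) =====
-- stated objective: alternative
-- what changed: Replaces the iterative index loop with two append-accumulators by a structural recursion over the lap list that builds both boundary lists back-to-front by consing, with no intermediate index list.
import Mathlib
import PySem

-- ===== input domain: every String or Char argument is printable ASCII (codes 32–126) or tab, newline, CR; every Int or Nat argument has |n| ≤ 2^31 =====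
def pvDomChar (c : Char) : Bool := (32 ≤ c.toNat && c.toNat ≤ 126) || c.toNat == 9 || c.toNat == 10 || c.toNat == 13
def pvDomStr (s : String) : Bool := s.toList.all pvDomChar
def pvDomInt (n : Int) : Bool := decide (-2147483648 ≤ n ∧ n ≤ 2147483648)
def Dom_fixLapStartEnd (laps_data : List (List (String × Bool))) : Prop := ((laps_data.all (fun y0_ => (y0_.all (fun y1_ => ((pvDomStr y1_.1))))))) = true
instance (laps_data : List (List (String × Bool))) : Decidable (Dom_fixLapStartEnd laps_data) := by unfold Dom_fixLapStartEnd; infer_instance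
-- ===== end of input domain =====

-- B replaces the iterative index loop (append-accumulators) by a structural recursion over the
-- lap list that builds both boundary lists back-to-front by consing (objective: alternative).

-- lookup of d['is_pit_out_lap']; defaulted with false — exact wherever the key is present (guaranteed by Pre_)
def pvFlag (d : List (String × Bool)) : Bool :=
  ((PySem.Dict.mk d).get? "is_pit_out_lap").getD false

-- ===== PORT A =====
def fixLapStartEnd (laps_data : List (List (String × Bool))) : List (String × List Int) :=
  let ld :=
    if pvFlag ((PySem.List.pyGet? laps_data 0).getD []) == true
        && pvFlag ((PySem.List.pyGet? laps_data 1).getD []) == true then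
      PySem.List.slice laps_data (some 1) none
    else laps_data
  let st := (PySem.List.pyRange 0 (ld.length : Int) 1).foldl
    (fun (st : List Int × List Int) lap_n =>
      if pvFlag ((PySem.List.pyGet? ld lap_n).getD []) || (lap_n == 0) then
        (st.1 ++ [lap_n], if lap_n ≠ 0 then st.2 ++ [lap_n] else st.2)
      else st)
    ([], [])
  [("lap_start", st.1), ("lap_end", st.2 ++ [(ld.length : Int) + 1])]

-- ===== PORT B =====
-- the inner recursive helper 'go' of Source B, step for step
def pvGo : List (List (String × Bool)) → Int → List Int × List Int
  | [], i => ([], [i + 1])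
  | l :: ls, i =>
    let se := pvGo ls (i + 1)
    if i == 0 then ([0] ++ se.1, se.2)
    else if pvFlag l then ([i] ++ se.1, [i] ++ se.2)
    else se

def fixLapStartEnd_alt (laps_data : List (List (String × Bool))) : List (String × List Int) :=
  let ld :=
    if pvFlag ((PySem.List.pyGet? laps_data 0).getD []) == true
        && pvFlag ((PySem.List.pyGet? laps_data 1).getD []) == true then
      PySem.List.slice laps_data (some 1) none
    else laps_data
  let se := pvGo ld 0
  [("lap_start", se.1), ("lap_end", se.2)]

-- ===== PRECONDITION & SPEC =====
-- Pre_: A raises IndexError on the empty list and (when the first flag is True, so the 'and' does not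
-- short-circuit) on one-element lists, and KeyError when any lap dict lacks 'is_pit_out_lap'.
def Pre_fixLapStartEnd (laps_data : List (List (String × Bool))) : Prop :=
  1 ≤ laps_data.length ∧ (∀ d ∈ laps_data, (PySem.Dict.mk d).contains "is_pit_out_lap" = true) ∧
    (pvFlag ((PySem.List.pyGet? laps_data 0).getD []) = true → 2 ≤ laps_data.length)
instance (laps_data : List (List (String × Bool))) : Decidable (Pre_fixLapStartEnd laps_data) := by
  unfold Pre_fixLapStartEnd; infer_instance
def pvWitness_fixLapStartEnd : (List (List (String × Bool))) :=
  [[("is_pit_out_lap", false)], [("is_pit_out_lap", true)]]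

def Spec_fixLapStartEnd (laps_data : List (List (String × Bool))) (out : List (String × List Int)) : Prop := out = fixLapStartEnd_alt laps_data
instance (laps_data : List (List (String × Bool))) (out : List (String × List Int)) : Decidable (Spec_fixLapStartEnd laps_data out) := by unfold Spec_fixLapStartEnd; infer_instance

-- ===== CLAIM =====
def Claim_equal_fixLapStartEnd : Prop := ∀ (laps_data : List (List (String × Bool))), Dom_fixLapStartEnd laps_data → Pre_fixLapStartEnd laps_data → Spec_fixLapStartEnd laps_data (fixLapStartEnd laps_data)

-- ===== LEMMAS AND PROOFS =====

-- A's loop over indices that are all nonzero appends the flagged indices to both accumulators.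
theorem loop_eq (f : Int → Bool) (idxs : List Int) (h : ∀ i ∈ idxs, i ≠ 0)
    (s e : List Int) :
    idxs.foldl
      (fun (st : List Int × List Int) lap_n =>
        if f lap_n || (lap_n == 0) then
          (st.1 ++ [lap_n], if lap_n ≠ 0 then st.2 ++ [lap_n] else st.2)
        else st)
      (s, e)
    = (s ++ idxs.filter f, e ++ idxs.filter f) := by
  induction idxs generalizing s e with
  | nil => simp
  | cons i t ih =>
    have hi : i ≠ 0 := h i (by simp)
    have ht : ∀ j ∈ t, j ≠ 0 := fun j hj => h j (by simp [hj])
    rw [List.foldl_cons]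
    by_cases hf : f i = true
    · have hc : (f i || (i == 0)) = true := by simp [hf]
      rw [if_pos hc, if_pos hi, ih ht, List.filter_cons_of_pos (by simp [hf])]
      simp
    · simp only [Bool.not_eq_true] at hf
      have hc : ¬ ((f i || (i == 0)) = true) := by simp [hf, hi]
      rw [if_neg hc, ih ht, List.filter_cons_of_neg (by simp [hf])]

theorem main_eq (ld : List (List (String × Bool))) (h : 1 ≤ ld.length) :
    (PySem.List.pyRange 0 (ld.length : Int) 1).foldl
      (fun (st : List Int × List Int) lap_n =>
        if pvFlag ((PySem.List.pyGet? ld lap_n).getD []) || (lap_n == 0) then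
          (st.1 ++ [lap_n], if lap_n ≠ 0 then st.2 ++ [lap_n] else st.2)
        else st)
      ([], [])
    = ([0] ++ (PySem.List.pyRange 1 (ld.length : Int) 1).filter
          (fun i => pvFlag ((PySem.List.pyGet? ld i).getD [])),
       (PySem.List.pyRange 1 (ld.length : Int) 1).filter
          (fun i => pvFlag ((PySem.List.pyGet? ld i).getD []))) := by
  have hlt : (0 : Int) < (ld.length : Int) := by exact_mod_cast h
  rw [PySem.List.pyRange_one_cons hlt]
  have h0 : (0 : Int) + 1 = 1 := by norm_num
  rw [List.foldl_cons, h0]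
  have hnz : ∀ i ∈ PySem.List.pyRange 1 (ld.length : Int) 1, i ≠ 0 := by
    intro i hi
    have := (PySem.List.mem_pyRange_one).mp hi
    omega
  simp only [if_pos (by simp : (pvFlag ((PySem.List.pyGet? ld 0).getD []) || ((0:Int) == 0)) = true)]
  rw [loop_eq _ _ hnz]
  simp

-- B's recursion on a nonempty-prefix suffix computes the filtered index range of the full list.
theorem pvGo_suffix (ld pre ls : List (List (String × Bool))) (hld : ld = pre ++ ls)
    (hpre : 1 ≤ pre.length) :
    pvGo ls (pre.length : Int)
    = ((PySem.List.pyRange (pre.length : Int) (ld.length : Int) 1).filter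
          (fun i => pvFlag ((PySem.List.pyGet? ld i).getD [])),
       ((PySem.List.pyRange (pre.length : Int) (ld.length : Int) 1).filter
          (fun i => pvFlag ((PySem.List.pyGet? ld i).getD []))) ++ [(ld.length : Int) + 1]) := by
  induction ls generalizing pre with
  | nil =>
    subst hld
    rw [PySem.List.pyRange_one_eq_nil (by simp)]
    simp [pvGo]
  | cons l t ih =>
    have hlen : ld.length = pre.length + (l :: t).length := by simp [hld]
    have hlt : ((pre.length : Int)) < (ld.length : Int) := by
      have : pre.length < ld.length := by rw [hlen]; simp
      exact_mod_cast this
    have hget : PySem.List.pyGet? ld (pre.length : Int) = some l := by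
      rw [hld]; exact PySem.List.pyGet?_append_length pre t l
    have hih := ih (pre ++ [l]) (by rw [hld]; simp) (by simp)
    have hcast : ((pre ++ [l]).length : Int) = (pre.length : Int) + 1 := by
      simp
    rw [hcast] at hih
    have hne : ¬ ((pre.length : Int) == 0) = true := by
      simp only [beq_iff_eq]
      omega
    rw [PySem.List.pyRange_one_cons hlt]
    show pvGo (l :: t) (pre.length : Int) = _
    rw [pvGo, hih]
    by_cases hf : pvFlag l = true
    · rw [if_neg hne, if_pos hf, List.filter_cons_of_pos (by simp [hget, hf])]
      simp
    · rw [if_neg hne, if_neg hf, List.filter_cons_of_neg (by simp [hget, hf])]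

theorem pvGo_zero (ld : List (List (String × Bool))) (h : 1 ≤ ld.length) :
    pvGo ld 0
    = ([0] ++ (PySem.List.pyRange 1 (ld.length : Int) 1).filter
          (fun i => pvFlag ((PySem.List.pyGet? ld i).getD [])),
       ((PySem.List.pyRange 1 (ld.length : Int) 1).filter
          (fun i => pvFlag ((PySem.List.pyGet? ld i).getD []))) ++ [(ld.length : Int) + 1]) := by
  cases ld with
  | nil => simp at h
  | cons l t =>
    have hsuf := pvGo_suffix (l :: t) [l] t (by simp) (by simp)
    have h1 : (([l] : List (List (String × Bool))).length : Int) = 1 := by simp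
    rw [h1] at hsuf
    rw [pvGo]
    simp only [show ((0 : Int) == 0) = true from rfl, if_true]
    rw [show (0 : Int) + 1 = 1 from by norm_num, hsuf]

-- ===== VERDICT =====
theorem fixLapStartEnd_spec : Claim_equal_fixLapStartEnd := by
  intro laps_data _hdom hpre
  unfold Spec_fixLapStartEnd fixLapStartEnd fixLapStartEnd_alt
  obtain ⟨hlen, -, h2⟩ := hpre
  set ld :=
    if pvFlag ((PySem.List.pyGet? laps_data 0).getD []) == true
        && pvFlag ((PySem.List.pyGet? laps_data 1).getD []) == true then
      PySem.List.slice laps_data (some 1) none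
    else laps_data with hld
  have h1 : 1 ≤ ld.length := by
    rw [hld]
    split
    · rename_i hg
      simp only [Bool.and_eq_true, beq_iff_eq] at hg
      have := h2 hg.1
      simp only [PySem.List.slice_from_one, List.length_tail]
      omega
    · omega
  simp only []
  rw [main_eq ld h1, pvGo_zero ld h1]
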